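-- pv_equiv track=rewrite | github.com/ArtyomIgn/newsignals_api | example_prod.py | check_new_news
-- ===== SOURCE A (Python) =====
-- def check_new_news(latest_news, news_data):
--     new_news = []
--     latest = latest_news
--     for news in news_data:
--         if news['published_primary_source'] > latest_news['published_primary_source']:
--             new_news.append(news)
--             if news['published_primary_source'] > latest['published_primary_source']:
--                 latest = news
--         elif news['published_primary_source'] == latest_news['published_primary_source'] and news != latest_news:
--             new_news.append(news)
--     return new_news, latest
-- ===== SOURCE B (Python) =====
-- def check_new_news(latest_news, news_data):
--     latest_published = latest_news['published_primary_source']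
--     new_news = [news for news in news_data
--                 if news['published_primary_source'] > latest_published
--                 or (news['published_primary_source'] == latest_published
--                     and news != latest_news)]
--     latest = max((news for news in news_data
--                   if news['published_primary_source'] > latest_published),
--                  key=lambda news: news['published_primary_source'],
--                  default=latest_news)
--     return new_news, latest
-- ===== Notes on version B (the rewrite author's own statement) =====
-- stated objective: simpler
-- what changed: The fused accumulator loop is split into a declarative comprehension for the filtered list plus a built-in max (with key and default) restricted to strictly newer items, replacing the hand-maintained running-latest state.
-- outside the precondition, e.g. on check_new_news({}, []): A returns ([], {}), B raises KeyError
import Mathlib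
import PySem

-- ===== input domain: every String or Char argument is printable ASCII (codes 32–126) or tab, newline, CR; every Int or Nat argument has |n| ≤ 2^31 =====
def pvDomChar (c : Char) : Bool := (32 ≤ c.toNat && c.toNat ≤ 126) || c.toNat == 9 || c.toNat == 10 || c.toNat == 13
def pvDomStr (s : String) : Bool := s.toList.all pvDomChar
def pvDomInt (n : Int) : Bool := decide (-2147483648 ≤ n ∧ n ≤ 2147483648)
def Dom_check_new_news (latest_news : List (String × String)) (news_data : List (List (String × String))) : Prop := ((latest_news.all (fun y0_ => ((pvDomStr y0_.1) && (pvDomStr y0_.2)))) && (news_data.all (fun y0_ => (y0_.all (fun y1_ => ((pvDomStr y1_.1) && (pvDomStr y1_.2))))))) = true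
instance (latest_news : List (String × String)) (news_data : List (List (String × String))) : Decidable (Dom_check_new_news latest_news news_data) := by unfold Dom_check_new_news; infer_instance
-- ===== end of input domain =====

-- B replaces A's fused accumulator loop by a comprehension (filter) plus a built-in max
-- with key/default over the strictly-newer items; same cost, simpler decomposition.

-- ===== PORT A =====

-- d['published_primary_source'] (dicts arrive as assoc lists, first binding wins);
-- Pre_check_new_news guarantees the key is present, so the "" default is never reached there.
def pvGetPub (d : List (String × String)) : String :=
  (d.lookup "published_primary_source").getD ""

-- Python's `==` on dicts ignores insertion order: same key set, same value at each key.
def pvDictEq (a b : List (String × String)) : Bool :=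
  (PySem.List.dedup (a.map Prod.fst)).all (fun k => b.lookup k == a.lookup k) &&
  (PySem.List.dedup (b.map Prod.fst)).all (fun k => a.lookup k == b.lookup k)

def check_new_news (latest_news : List (String × String)) (news_data : List (List (String × String))) : (List (List (String × String))) × (List (String × String)) :=
  news_data.foldl
    (fun st news =>
      if pvGetPub latest_news < pvGetPub news then
        (st.1 ++ [news],
         if pvGetPub st.2 < pvGetPub news then news else st.2)
      else if pvGetPub news == pvGetPub latest_news && !(pvDictEq news latest_news) then
        (st.1 ++ [news], st.2)
      else st)
    ([], latest_news)

-- ===== PORT B =====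
def check_new_news_alt (latest_news : List (String × String)) (news_data : List (List (String × String))) : (List (List (String × String))) × (List (String × String)) :=
  let latest_published := pvGetPub latest_news
  let new_news := news_data.filter (fun news =>
    decide (latest_published < pvGetPub news) ||
    (pvGetPub news == latest_published && !(pvDictEq news latest_news)))
  let latest := PySem.List.maxD
    (news_data.filter (fun news => decide (latest_published < pvGetPub news)))
    pvGetPub latest_news
  (new_news, latest)

-- ===== PRECONDITION & SPEC =====
-- Pre_ excludes the inputs where 'published_primary_source' is missing from latest_news or from some
-- element of news_data: there A raises KeyError at the first loop iteration — except when news_data is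
-- empty and only latest_news lacks the key, where A returns without ever reading it while B reads it
-- eagerly and raises KeyError.
def Pre_check_new_news (latest_news : List (String × String)) (news_data : List (List (String × String))) : Prop :=
  "published_primary_source" ∈ latest_news.map Prod.fst ∧
  ∀ n ∈ news_data, "published_primary_source" ∈ n.map Prod.fst
instance (latest_news : List (String × String)) (news_data : List (List (String × String))) : Decidable (Pre_check_new_news latest_news news_data) := by unfold Pre_check_new_news; infer_instance

def pvWitness_check_new_news : (List (String × String)) × (List (List (String × String))) :=
  ([("published_primary_source", "b"), ("title", "t")],
   [[("published_primary_source", "c")], [("published_primary_source", "a")]])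

def Spec_check_new_news (latest_news : List (String × String)) (news_data : List (List (String × String))) (out : (List (List (String × String))) × (List (String × String))) : Prop := out = check_new_news_alt latest_news news_data
instance (latest_news : List (String × String)) (news_data : List (List (String × String))) (out : (List (List (String × String))) × (List (String × String))) : Decidable (Spec_check_new_news latest_news news_data out) := by unfold Spec_check_new_news; infer_instance

-- ===== CLAIM (what is proved, stated in full; the proofs are below) =====
def Claim_equal_check_new_news : Prop := ∀ (latest_news : List (String × String)) (news_data : List (List (String × String))), Dom_check_new_news latest_news news_data → Pre_check_new_news latest_news news_data → Spec_check_new_news latest_news news_data (check_new_news latest_news news_data)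

-- ===== LEMMAS AND PROOFS =====

-- B's filter predicate (the membership test of A's two appending branches, fused).
def pvPred (L : String) (ln : List (String × String)) (n : List (String × String)) : Bool :=
  decide (L < pvGetPub n) || (pvGetPub n == L && !(pvDictEq n ln))

-- A's running-latest update, in isolation.
def pvStep2 (L : String) (lt n : List (String × String)) : List (String × String) :=
  if L < pvGetPub n then (if pvGetPub lt < pvGetPub n then n else lt) else lt

-- The same update on an Option accumulator (B's max over the filtered items, fused back onto l).
def pvStepOpt (L : String) (acc : Option (List (String × String))) (n : List (String × String)) :
    Option (List (String × String)) :=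
  if L < pvGetPub n then
    match acc with
    | none => some n
    | some m => if pvGetPub m < pvGetPub n then some n else some m
  else acc

-- A's fused foldl splits into the append-if loop and the running-latest loop.
theorem pv_split (ln : List (String × String)) (l : List (List (String × String)))
    (a : List (List (String × String))) (b : List (String × String)) :
    l.foldl
      (fun st news =>
        if pvGetPub ln < pvGetPub news then
          (st.1 ++ [news], if pvGetPub st.2 < pvGetPub news then news else st.2)
        else if pvGetPub news == pvGetPub ln && !(pvDictEq news ln) then
          (st.1 ++ [news], st.2)
        else st)
      (a, b)
    = (l.foldl (fun acc n => if pvPred (pvGetPub ln) ln n then acc ++ [n] else acc) a,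
       l.foldl (pvStep2 (pvGetPub ln)) b) := by
  induction l generalizing a b with
  | nil => rfl
  | cons n t ih =>
    simp only [List.foldl_cons]
    rw [← ih]
    congr 1
    simp only [pvPred, pvStep2]
    by_cases h1 : pvGetPub ln < pvGetPub n
    · simp [h1]
    · by_cases h2 : pvGetPub n == pvGetPub ln && !(pvDictEq n ln) <;> simp [h1, h2]

-- B's max-with-key-and-default over the filtered list, as a foldl over the whole list.
theorem pv_maxD (L : String) (ln : List (String × String)) (l : List (List (String × String))) :
    PySem.List.maxD (l.filter (fun n => decide (L < pvGetPub n))) pvGetPub ln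
    = (l.foldl (pvStepOpt L) none).getD ln := by
  rw [PySem.List.maxD, PySem.List.max?, List.foldl_filter]
  congr 1
  apply List.foldl_ext
  intro a b _
  by_cases h : L < pvGetPub b <;> cases a <;> simp [pvStepOpt, h]

-- The running-latest loop is the Option loop with default ln.
theorem pv_latest (ln : List (String × String)) (l : List (List (String × String)))
    (acc : Option (List (String × String))) (lt : List (String × String))
    (h : (acc = none ∧ lt = ln) ∨ acc = some lt) :
    (l.foldl (pvStepOpt (pvGetPub ln)) acc).getD ln
    = l.foldl (pvStep2 (pvGetPub ln)) lt := by
  induction l generalizing acc lt with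
  | nil => rcases h with ⟨rfl, rfl⟩ | rfl <;> simp
  | cons n t ih =>
    simp only [List.foldl_cons]
    rcases h with ⟨rfl, h2⟩ | rfl
    · rw [h2]
      by_cases hn : pvGetPub ln < pvGetPub n
      · exact ih _ _ (Or.inr (by simp [pvStepOpt, pvStep2, hn]))
      · exact ih _ _ (Or.inl ⟨by simp [pvStepOpt, hn], by simp [pvStep2, hn]⟩)
    · by_cases hn : pvGetPub ln < pvGetPub n
      · by_cases hm : pvGetPub lt < pvGetPub n
        · exact ih _ _ (Or.inr (by simp [pvStepOpt, pvStep2, hn, hm]))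
        · exact ih _ _ (Or.inr (by simp [pvStepOpt, pvStep2, hn, hm]))
      · exact ih _ _ (Or.inr (by simp [pvStepOpt, pvStep2, hn]))

-- ===== VERDICT (by name: the statement is the Claim_ definition above) =====
theorem check_new_news_spec : Claim_equal_check_new_news := by
  intro latest_news news_data _ _
  show check_new_news latest_news news_data = check_new_news_alt latest_news news_data
  unfold check_new_news check_new_news_alt
  rw [pv_split]
  show _ = (List.filter (fun news =>
      decide (pvGetPub latest_news < pvGetPub news) ||
      (pvGetPub news == pvGetPub latest_news && !(pvDictEq news latest_news))) news_data,
    PySem.List.maxD (List.filter (fun news =>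
      decide (pvGetPub latest_news < pvGetPub news)) news_data) pvGetPub latest_news)
  rw [Prod.mk.injEq]
  refine ⟨?_, ?_⟩
  · rw [PySem.List.foldl_append_if_eq_filter]
    simp only [List.nil_append]
    rfl
  · rw [pv_maxD]
    exact (pv_latest latest_news news_data none latest_news (Or.inl ⟨rfl, rfl⟩)).symm
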